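-- pv_equiv track=rewrite | github.com/glennwli/bootcamp | exercise1/secondary_structure.py | rna_ss_validator
-- ===== SOURCE A (Python) =====
-- def validate_par (structure):
--     """makes sure number of open = number of closed"""
--
--     if structure.count('(') == structure.count(')') and structure.find('(')<structure.find(')'):
--         return True
--
--     return False
--
-- def dotparen_to_bp(structure):
--     """converts dot parens"""
--
--     #check if valid
--     if validate_par(structure) == False:
--         return -1
--
--     open_coord = []
--     basepairs = []
--
--     for i, char in enumerate(structure):
--         if char == '(':
--             open_coord.append(i)
--         elif char ==')':
--             if len(open_coord)>0:
--                 basepairs.append((open_coord.pop(),i))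
--             else:
--                 return -1
--     return tuple(sorted(basepairs))
--
-- def verify_hairpin(structure):
--     """check validity of hairpins"""
--     #get basepairs
--     basepairs = dotparen_to_bp(structure)
--
--     #make sure the structure was valid
--     if basepairs == -1:
--         return False
--
--     #check that they're all at least 4 apart
--     for bp in basepairs:
--         if bp[0] + 4 >= bp[1]:
--             return False
--
--     return True
--
-- def rna_ss_validator(seq, sec_struc, wobble=True):
--     """checks 2' struct"""
--
--     #check if same length, hairpins and sec_struc input are valid
--
--     if not(verify_hairpin(sec_struc) and validate_par(sec_struc)
--     and len(seq)==len(sec_struc)):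
--         return False
--
--     #get base pairs
--     bp_position = dotparen_to_bp(sec_struc)
--
--
--     #valid pairs
--     if wobble:
--         valid = ('gu','gc','au','ug','cg','ua')
--     else:
--         valid = ('gc','au','ug','cg','ua')
--
--
--     for i, bp in enumerate(bp_position):
--         basepair = (seq[bp[0]]+seq[bp[1]]).lower()
--
--         if basepair not in valid:
--             return False
--
--     #if we made it this far, we're true
--     return True
-- ===== SOURCE B (Python) =====
-- def rna_ss_validator(seq, sec_struc, wobble=True):
--     """checks 2' struct -- single stack-based pass over sec_struc"""
--     if len(seq) != len(sec_struc):
--         return False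
--     if wobble:
--         ok = {('g', 'u'), ('g', 'c'), ('a', 'u'), ('u', 'g'), ('c', 'g'), ('u', 'a')}
--     else:
--         ok = {('g', 'c'), ('a', 'u'), ('u', 'g'), ('c', 'g'), ('u', 'a')}
--     stack = []
--     npairs = 0
--     for i, ch in enumerate(sec_struc):
--         if ch == '(':
--             stack.append(i)
--         elif ch == ')':
--             if not stack:
--                 return False
--             j = stack.pop()
--             if i < j + 5:
--                 return False
--             if (seq[j].lower(), seq[i].lower()) not in ok:
--                 return False
--             npairs += 1
--     return not stack and npairs > 0
-- ===== Notes on version B (the rewrite author's own statement) =====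
-- stated objective: simpler
-- what changed: A validates in four passes (paren count/find check, dot-paren-to-pairs conversion run twice, a hairpin scan and a base-pair scan over the sorted pair list); B is a single stack-based pass over sec_struc that checks hairpin distance and base validity the moment each pair is closed, requiring at least one closed pair at the end.
import Mathlib
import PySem

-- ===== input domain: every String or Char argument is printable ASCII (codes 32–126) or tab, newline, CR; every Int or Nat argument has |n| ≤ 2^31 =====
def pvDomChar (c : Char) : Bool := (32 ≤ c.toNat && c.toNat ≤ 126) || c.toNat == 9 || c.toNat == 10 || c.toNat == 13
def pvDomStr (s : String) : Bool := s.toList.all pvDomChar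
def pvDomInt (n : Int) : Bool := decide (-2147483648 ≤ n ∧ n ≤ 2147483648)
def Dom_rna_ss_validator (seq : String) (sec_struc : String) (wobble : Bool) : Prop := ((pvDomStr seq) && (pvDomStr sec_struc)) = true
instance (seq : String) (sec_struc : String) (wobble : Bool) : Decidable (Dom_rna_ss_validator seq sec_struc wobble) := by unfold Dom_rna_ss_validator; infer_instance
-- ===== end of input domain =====

-- B replaces A's four separate passes (count/find validation, two dot-paren conversions, sorted
-- hairpin scan, base-pair scan) by one stack-based pass that checks each pair as it closes: simpler.

-- ===== PORT A =====
-- validate_par: number of '(' equals number of ')' and first '(' comes before first ')'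
def validate_par (struc : String) : Bool :=
  if PySem.Str.count struc "(" = PySem.Str.count struc ")" ∧
      PySem.Str.find struc "(" < PySem.Str.find struc ")" then true else false

-- the for-loop of dotparen_to_bp: push index on '(', pop-and-pair on ')' (none = Python's return -1)
def dotparen_loop : List (Char × Nat) → List Nat → List (Nat × Nat) → Option (List (Nat × Nat))
  | [], _open_coord, basepairs => some basepairs
  | (char, i) :: rest, open_coord, basepairs =>
    if char = '(' then dotparen_loop rest (i :: open_coord) basepairs
    else if char = ')' then
      match open_coord with
      | [] => none
      | j :: open_coord' => dotparen_loop rest open_coord' (basepairs ++ [(j, i)])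
    else dotparen_loop rest open_coord basepairs

-- dotparen_to_bp: none = Python's -1, some = tuple(sorted(basepairs))
def dotparen_to_bp (struc : String) : Option (List (Nat × Nat)) :=
  if validate_par struc = false then none
  else (dotparen_loop struc.toList.zipIdx [] []).map
        (fun basepairs => PySem.List.sorted2 basepairs (fun bp => bp.1) (fun bp => bp.2))

def verify_hairpin (struc : String) : Bool :=
  match dotparen_to_bp struc with
  | none => false
  | some basepairs => basepairs.all (fun bp => !decide (bp.1 + 4 ≥ bp.2))

def rna_ss_validator (seq : String) (sec_struc : String) (wobble : Bool) : Bool :=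
  if !(verify_hairpin sec_struc && validate_par sec_struc
      && (PySem.Str.len seq == PySem.Str.len sec_struc)) then false
  else
    -- under the guard verify_hairpin is true, so dotparen_to_bp is never none; getD [] is unreachable
    let bp_position := (dotparen_to_bp sec_struc).getD []
    let valid : List String :=
      if wobble then ["gu", "gc", "au", "ug", "cg", "ua"] else ["gc", "au", "ug", "cg", "ua"]
    -- indices in bp_position are < len sec_struc = len seq, so Python's seq[...] never raises
    bp_position.all (fun bp =>
      valid.contains (PySem.Str.lower (String.ofList
        [PySem.List.pyGetD seq.toList (bp.1 : Int) ' ', PySem.List.pyGetD seq.toList (bp.2 : Int) ' '])))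

-- ===== PORT B =====
def alt_ok_pairs (wobble : Bool) : PySem.Set (String × String) :=
  if wobble then
    PySem.Set.ofList [("g", "u"), ("g", "c"), ("a", "u"), ("u", "g"), ("c", "g"), ("u", "a")]
  else
    PySem.Set.ofList [("g", "c"), ("a", "u"), ("u", "g"), ("c", "g"), ("u", "a")]

-- the single pass: stack of open indices, count of closed pairs; each pair checked as it closes
def alt_loop (seq : String) (ok : PySem.Set (String × String)) :
    List (Char × Nat) → List Nat → Nat → Bool
  | [], stack, npairs => stack.isEmpty && decide (0 < npairs)
  | (ch, i) :: rest, stack, npairs =>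
    if ch = '(' then alt_loop seq ok rest (i :: stack) npairs
    else if ch = ')' then
      match stack with
      | [] => false
      | j :: stack' =>
        if i < j + 5 then false
        else if !(PySem.Set.contains ok
            (PySem.Str.lower (String.ofList [PySem.List.pyGetD seq.toList (j : Int) ' ']),
             PySem.Str.lower (String.ofList [PySem.List.pyGetD seq.toList (i : Int) ' ']))) then false
        else alt_loop seq ok rest stack' (npairs + 1)
    else alt_loop seq ok rest stack npairs

def rna_ss_validator_alt (seq : String) (sec_struc : String) (wobble : Bool) : Bool :=
  if PySem.Str.len seq ≠ PySem.Str.len sec_struc then false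
  else alt_loop seq (alt_ok_pairs wobble) sec_struc.toList.zipIdx [] 0

-- ===== PRECONDITION & SPEC =====
def Spec_rna_ss_validator (seq : String) (sec_struc : String) (wobble : Bool) (out : Bool) : Prop := out = rna_ss_validator_alt seq sec_struc wobble
instance (seq : String) (sec_struc : String) (wobble : Bool) (out : Bool) : Decidable (Spec_rna_ss_validator seq sec_struc wobble out) := by unfold Spec_rna_ss_validator; infer_instance

-- ===== CLAIM (what is proved, stated in full; the proofs are below) =====
def Claim_equal_rna_ss_validator : Prop := ∀ (seq : String) (sec_struc : String) (wobble : Bool), Dom_rna_ss_validator seq sec_struc wobble → Spec_rna_ss_validator seq sec_struc wobble (rna_ss_validator seq sec_struc wobble)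

-- ===== LEMMAS AND PROOFS =====

-- proof-side mirror of dotparen_loop that also returns the final stack
def dpS : List (Char × Nat) → List Nat → Option (List Nat × List (Nat × Nat))
  | [], st => some (st, [])
  | (c, i) :: rest, st =>
    if c = '(' then dpS rest (i :: st)
    else if c = ')' then
      match st with
      | [] => none
      | j :: st' => (dpS rest st').map (fun r => (r.1, (j, i) :: r.2))
    else dpS rest st

-- the per-pair check B performs, abstracted
def lw (seq : String) (j : Nat) : String :=
  PySem.Str.lower (String.ofList [PySem.List.pyGetD seq.toList (j : Int) ' '])

def okB (seq : String) (ok : PySem.Set (String × String)) (bp : Nat × Nat) : Bool :=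
  decide (bp.1 + 5 ≤ bp.2) && PySem.Set.contains ok (lw seq bp.1, lw seq bp.2)

lemma singleton_prefix (a : Char) (l : List Char) : [a] <+: l ↔ l.head? = some a := by
  cases l <;> simp [List.prefix_cons_iff, eq_comm]

lemma all_and {α : Type} (l : List α) (p q : α → Bool) :
    (l.all fun x => p x && q x) = (l.all p && l.all q) := by
  induction l with
  | nil => rfl
  | cons h t ih => simp [List.all_cons, ih, Bool.and_assoc, Bool.and_comm, Bool.and_left_comm]

lemma count_go_step (sub : List Char) (f acc : Nat) (x : Char) (t : List Char) :
    PySem.Chars.count.go sub (f+1) (x :: t) acc =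
      if sub.isPrefixOf (x :: t) then
        PySem.Chars.count.go sub f (List.drop sub.length (x :: t)) (acc + 1)
      else PySem.Chars.count.go sub f t acc := by
  rw [PySem.Chars.count.go]

lemma count_go_singleton (c : Char) : ∀ (l : List Char) (fuel acc : Nat), l.length ≤ fuel →
    PySem.Chars.count.go [c] fuel l acc = acc + l.count c := by
  intro l
  induction l with
  | nil => intro fuel acc _; cases fuel <;> simp [PySem.Chars.count.go]
  | cons x t ih =>
    intro fuel acc h
    cases fuel with
    | zero => simp at h
    | succ f =>
      have hf : t.length ≤ f := by simpa using h
      rw [count_go_step]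
      by_cases hc : c = x
      · subst hc
        simp only [List.isPrefixOf, BEq.rfl, Bool.true_and, List.isPrefixOf_nil_left, if_true]
        rw [show List.drop [c].length (c :: t) = t from by simp]
        rw [ih f (acc + 1) hf]
        simp [List.count_cons]
        omega
      · have hbeq : (c == x) = false := by simpa using hc
        simp only [List.isPrefixOf, hbeq, Bool.false_and, if_false]
        rw [ih f acc hf]
        have hbeq2 : (x = c) = False := by
          simp only [eq_iff_iff, iff_false]; exact fun h2 => hc h2.symm
        simp [List.count_cons, hbeq2]

lemma chars_count_singleton (c : Char) (cs : List Char) :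
    PySem.Chars.count cs [c] = cs.count c := by
  simp [PySem.Chars.count, count_go_singleton c cs cs.length 0 le_rfl]

-- dotparen_loop in terms of dpS
lemma dotparen_loop_eq : ∀ (l : List (Char × Nat)) (st : List Nat) (acc : List (Nat × Nat)),
    dotparen_loop l st acc = (dpS l st).map (fun r => acc ++ r.2) := by
  intro l
  induction l with
  | nil => intro st acc; simp [dotparen_loop, dpS]
  | cons p rest ih =>
    intro st acc
    obtain ⟨c, i⟩ := p
    by_cases hc : c = '('
    · simp [dotparen_loop, dpS, hc, ih]
    · by_cases hc2 : c = ')'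
      · cases st with
        | nil => simp [dotparen_loop, dpS, hc, hc2]
        | cons j st' =>
          simp only [dotparen_loop, dpS, hc, hc2, if_false, if_true, ih]
          cases dpS rest st' <;> simp
      · simp [dotparen_loop, dpS, hc, hc2, ih]

-- B's loop in terms of dpS
lemma alt_loop_eq (seq : String) (ok : PySem.Set (String × String)) :
    ∀ (l : List (Char × Nat)) (st : List Nat) (n : Nat),
    alt_loop seq ok l st n =
      (match dpS l st with
       | none => false
       | some r => r.1.isEmpty && decide (0 < n + r.2.length) && r.2.all (okB seq ok)) := by
  intro l
  induction l with
  | nil => intro st n; simp [alt_loop, dpS]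
  | cons p rest ih =>
    intro st n
    obtain ⟨c, i⟩ := p
    by_cases hc : c = '('
    · simp [alt_loop, dpS, hc, ih]
    · by_cases hc2 : c = ')'
      · cases st with
        | nil => simp [alt_loop, dpS, hc, hc2]
        | cons j st' =>
          simp only [alt_loop, dpS, hc, hc2, if_false, if_true]
          cases hr : dpS rest st' with
          | none =>
            simp only [hr, Option.map_none]
            split_ifs <;> simp [ih, hr]
          | some r =>
            simp only [hr, Option.map_some]
            by_cases hd : i < j + 5
            · have : ¬ (j + 5 ≤ i) := by omega
              simp [hd, okB, this]
            · by_cases hb : PySem.Set.contains ok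
                  (PySem.Str.lower (String.ofList [PySem.List.pyGetD seq.toList (j : Int) ' ']),
                   PySem.Str.lower (String.ofList [PySem.List.pyGetD seq.toList (i : Int) ' ']))
              · have hb2 : ((PySem.Str.lower (String.ofList [(seq.toList[j]?).getD ' ']),
                    PySem.Str.lower (String.ofList [(seq.toList[i]?).getD ' '])) ∈ ok) = True := by
                  simpa using hb
                have h5 : j + 5 ≤ i := by omega
                have h1 : (0:Nat) < n + 1 + r.2.length := by omega
                have h2 : (0:Nat) < n + (r.2.length + 1) := by omega
                simp [hd, hb, ih, hr, okB, lw, h5, h1, h2, Bool.and_assoc, Bool.and_comm,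
                  Bool.and_left_comm, hb2]
              · have hb' : ((PySem.Str.lower (String.ofList [(seq.toList[j]?).getD ' ']),
                    PySem.Str.lower (String.ofList [(seq.toList[i]?).getD ' '])) ∈ ok) = False := by
                  simpa using hb
                simp [hd, okB, lw, hb']
      · simp [alt_loop, dpS, hc, hc2, ih]

-- counting invariant of the stack pass
lemma dpS_counts : ∀ (cs : List Char) (k : Nat) (st : List Nat) (r : List Nat × List (Nat × Nat)),
    dpS (cs.zipIdx k) st = some r →
    cs.count '(' + st.length = r.2.length + r.1.length ∧ cs.count ')' = r.2.length := by
  intro cs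
  induction cs with
  | nil => intro k st r h; simp [dpS] at h; simp [← h]
  | cons c cs' ih =>
    intro k st r h
    rw [List.zipIdx_cons] at h
    by_cases hc : c = '('
    · subst hc
      rw [show dpS (('(', k) :: cs'.zipIdx (k+1)) st = dpS (cs'.zipIdx (k+1)) (k :: st) from by
        simp [dpS]] at h
      obtain ⟨h1, h2⟩ := ih (k+1) (k :: st) _ h
      refine ⟨?_, ?_⟩
      · simp only [List.count_cons, BEq.rfl, if_true]
        simp only [List.length_cons] at h1
        omega
      · simpa [List.count_cons] using h2
    · by_cases hc2 : c = ')'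
      · subst hc2
        cases st with
        | nil => simp [dpS, hc] at h
        | cons j st' =>
          rw [show dpS ((')', k) :: cs'.zipIdx (k+1)) (j :: st') =
              (dpS (cs'.zipIdx (k+1)) st').map (fun r => (r.1, (j, k) :: r.2)) from by
            simp [dpS, hc]] at h
          cases hr : dpS (cs'.zipIdx (k+1)) st' with
          | none => rw [hr] at h; simp at h
          | some r' =>
            rw [hr] at h
            simp only [Option.map_some, Option.some.injEq] at h
            obtain ⟨h1, h2⟩ := ih (k+1) st' r' hr
            subst h
            refine ⟨?_, ?_⟩
            · simp [List.count_cons] at h1 ⊢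
              omega
            · simp [List.count_cons]
              omega
      · rw [show dpS ((c, k) :: cs'.zipIdx (k+1)) st = dpS (cs'.zipIdx (k+1)) st from by
          simp [dpS, hc, hc2]] at h
        obtain ⟨h1, h2⟩ := ih (k+1) st _ h
        have b1 : (c == '(') = false := by simpa using hc
        have b2 : (c == ')') = false := by simpa using hc2
        refine ⟨?_, ?_⟩ <;> simp [List.count_cons, b1, b2, h1, h2]

-- a successful pass from the empty stack has a '(' before any ')'
lemma dpS_open_before_close : ∀ (cs : List Char) (k : Nat) (r : List Nat × List (Nat × Nat)),
    dpS (cs.zipIdx k) [] = some r → ∀ p : Nat, cs[p]? = some ')' →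
    ∃ q < p, cs[q]? = some '(' := by
  intro cs
  induction cs with
  | nil => intro k r h p hp; simp at hp
  | cons c cs' ih =>
    intro k r h p hp
    rw [List.zipIdx_cons] at h
    by_cases hc : c = '('
    · have hp0 : 0 < p := by
        rcases Nat.eq_zero_or_pos p with h0 | h0
        · exfalso; rw [h0] at hp; rw [hc] at hp; simp at hp
        · exact h0
      exact ⟨0, hp0, by simp [hc]⟩
    · by_cases hc2 : c = ')'
      · simp [dpS, hc, hc2] at h
      · cases p with
        | zero => simp only [List.getElem?_cons_zero, Option.some.injEq] at hp; exact absurd hp hc2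
        | succ p' =>
          have h' : dpS (cs'.zipIdx (k+1)) [] = some r := by
            rw [show dpS ((c, k) :: cs'.zipIdx (k+1)) [] = dpS (cs'.zipIdx (k+1)) [] from by
              simp [dpS, hc, hc2]] at h
            exact h
          obtain ⟨q, hq, hget⟩ := ih (k+1) r h' p' (by simpa using hp)
          exact ⟨q + 1, by omega, by simpa using hget⟩

-- lowercasing distributes over the characters of an ofList string
lemma lower_ofList (l : List Char) :
    PySem.Str.lower (String.ofList l) = String.ofList (l.map PySem.Chars.lowerChar) := by
  rw [String.ext_iff]
  simp [PySem.Str.toList_lower, PySem.Chars.lower]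

-- A's base-pair test equals B's, pointwise
lemma base_eq (w : Bool) (x y : Char) :
    ((if w then (["gu", "gc", "au", "ug", "cg", "ua"] : List String)
      else ["gc", "au", "ug", "cg", "ua"]).contains (PySem.Str.lower (String.ofList [x, y])))
    = PySem.Set.contains (alt_ok_pairs w)
        (PySem.Str.lower (String.ofList [x]), PySem.Str.lower (String.ofList [y])) := by
  rw [lower_ofList, lower_ofList, lower_ofList]
  have e : ∀ (a b c d : Char), (String.ofList [a, b] = String.ofList [c, d]) ↔ (a = c ∧ b = d) := by
    intro a b c d; rw [String.ext_iff]; simp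
  have e1 : ∀ (a c : Char), (String.ofList [a] = String.ofList [c]) ↔ (a = c) := by
    intro a c; rw [String.ext_iff]; simp
  have ht : alt_ok_pairs true =
      [("g", "u"), ("g", "c"), ("a", "u"), ("u", "g"), ("c", "g"), ("u", "a")] := by decide
  have hfa : alt_ok_pairs false = [("g", "c"), ("a", "u"), ("u", "g"), ("c", "g"), ("u", "a")] := by
    decide
  cases w <;>
    simp [ht, hfa, List.contains_eq_mem, List.mem_cons,
      show ("gu" : String) = String.ofList ['g', 'u'] from rfl,
      show ("gc" : String) = String.ofList ['g', 'c'] from rfl,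
      show ("au" : String) = String.ofList ['a', 'u'] from rfl,
      show ("ug" : String) = String.ofList ['u', 'g'] from rfl,
      show ("cg" : String) = String.ofList ['c', 'g'] from rfl,
      show ("ua" : String) = String.ofList ['u', 'a'] from rfl,
      show ("g" : String) = String.ofList ['g'] from rfl,
      show ("u" : String) = String.ofList ['u'] from rfl,
      show ("a" : String) = String.ofList ['a'] from rfl,
      show ("c" : String) = String.ofList ['c'] from rfl,
      Prod.mk.injEq, e, e1]

-- A's hairpin test equals B's distance test, pointwise
lemma dist_eq (a b : Nat) : (!decide (a + 4 ≥ b)) = decide (a + 5 ≤ b) := by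
  by_cases h : a + 4 ≥ b
  · simp [h, show ¬ (a + 5 ≤ b) from by omega]
  · simp [h, show a + 5 ≤ b from by omega]

lemma toList_lparen : ("(" : String).toList = ['('] := by decide
lemma toList_rparen : (")" : String).toList = [')'] := by decide

-- the main equivalence, one input at a time
lemma main_eq (seq ss : String) (w : Bool) :
    rna_ss_validator seq ss w = rna_ss_validator_alt seq ss w := by
  unfold rna_ss_validator rna_ss_validator_alt
  rw [alt_loop_eq]
  cases hdp : dpS (ss.toList.zipIdx 0) [] with
  | none =>
    have hdnone : dotparen_to_bp ss = none := by
      unfold dotparen_to_bp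
      split
      · rfl
      · rw [dotparen_loop_eq, hdp]; rfl
    have hvh : verify_hairpin ss = false := by unfold verify_hairpin; rw [hdnone]
    rw [hvh]
    simp
  | some r =>
    obtain ⟨st, bps⟩ := r
    have hloop : dotparen_loop (ss.toList.zipIdx 0) [] [] = some bps := by
      rw [dotparen_loop_eq, hdp]; rfl
    obtain ⟨hcnt1, hcnt2⟩ := dpS_counts ss.toList 0 [] _ hdp
    simp only [List.length_nil, add_zero] at hcnt1
    have hco : PySem.Str.count ss "(" = ss.toList.count '(' := by
      rw [PySem.Str.count_eq, toList_lparen]; exact chars_count_singleton _ _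
    have hcc : PySem.Str.count ss ")" = ss.toList.count ')' := by
      rw [PySem.Str.count_eq, toList_rparen]; exact chars_count_singleton _ _
    cases st with
    | cons j st' =>
      have hvp : validate_par ss = false := by
        unfold validate_par
        rw [if_neg]
        rintro ⟨h1, -⟩
        rw [hco, hcc, hcnt1, hcnt2] at h1
        simp [List.length_cons] at h1
      rw [hvp]
      simp
    | nil =>
      by_cases hbe : bps = []
      · subst hbe
        have hnone1 : '(' ∉ ss.toList := by
          refine List.count_eq_zero.mp ?_
          simpa using hcnt1
        have hnone2 : ')' ∉ ss.toList := by
          refine List.count_eq_zero.mp ?_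
          simpa using hcnt2
        have hif1 : PySem.Chars.find ss.toList ['('] = -1 :=
          (PySem.Chars.find_eq_neg_one_iff _ _).mpr
            (fun hinf => hnone1 (hinf.subset (by simp)))
        have hif2 : PySem.Chars.find ss.toList [')'] = -1 :=
          (PySem.Chars.find_eq_neg_one_iff _ _).mpr
            (fun hinf => hnone2 (hinf.subset (by simp)))
        have hvp : validate_par ss = false := by
          unfold validate_par
          rw [if_neg]
          rintro ⟨-, h2⟩
          rw [PySem.Str.find_eq, PySem.Str.find_eq, toList_lparen, toList_rparen, hif1, hif2] at h2
          exact lt_irrefl _ h2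
        rw [hvp]
        simp
      · have hlpos : 0 < bps.length := List.length_pos_iff.mpr hbe
        have hmem2 : ')' ∈ ss.toList := by
          refine List.count_pos_iff.mp ?_
          rw [hcnt2]; exact hlpos
        have hinf2 : [')'] <:+: ss.toList := by
          obtain ⟨p, hpe⟩ := List.mem_iff_getElem?.mp hmem2
          have hpre : [')'] <+: ss.toList.drop p :=
            (singleton_prefix _ _).mpr (by rw [List.head?_drop]; exact hpe)
          exact hpre.isInfix.trans (List.drop_suffix p ss.toList).isInfix
        have h0f2 : 0 ≤ PySem.Chars.find ss.toList [')'] :=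
          (PySem.Chars.find_nonneg_iff _ _).mpr hinf2
        obtain ⟨hpre2, -⟩ := PySem.Chars.find_spec h0f2
        have hp2 : ss.toList[(PySem.Chars.find ss.toList [')']).toNat]? = some ')' := by
          rw [← List.head?_drop]; exact (singleton_prefix _ _).mp hpre2
        obtain ⟨q, hqlt, hq⟩ := dpS_open_before_close ss.toList 0 _ hdp _ hp2
        have hq' : ['('] <+: ss.toList.drop q :=
          (singleton_prefix _ _).mpr (by rw [List.head?_drop]; exact hq)
        have h0f1 : 0 ≤ PySem.Chars.find ss.toList ['('] :=
          (PySem.Chars.find_nonneg_iff _ _).mpr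
            (hq'.isInfix.trans (List.drop_suffix q ss.toList).isInfix)
        have hmin1 := (PySem.Chars.find_spec h0f1).2
        have hle : (PySem.Chars.find ss.toList ['(']).toNat ≤ q := by
          by_contra hgt
          exact hmin1 q (by omega) hq'
        have hvp : validate_par ss = true := by
          unfold validate_par
          rw [if_pos]
          constructor
          · rw [hco, hcc, hcnt1, hcnt2]; simp
          · rw [PySem.Str.find_eq, PySem.Str.find_eq, toList_lparen, toList_rparen]
            rw [← Int.toNat_of_nonneg h0f1, ← Int.toNat_of_nonneg h0f2]
            exact_mod_cast Nat.lt_of_le_of_lt hle hqlt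
        have hdtp : dotparen_to_bp ss =
            some (PySem.List.sorted2 bps (fun bp => bp.1) (fun bp => bp.2)) := by
          unfold dotparen_to_bp
          rw [if_neg (by simp [hvp]), hloop]
          rfl
        have hperm := PySem.List.sorted2_perm bps (fun bp => bp.1) (fun bp => bp.2) false
        have hvh : verify_hairpin ss = (bps.all fun bp => !decide (bp.1 + 4 ≥ bp.2)) := by
          unfold verify_hairpin
          rw [hdtp]
          exact hperm.all_eq
        have hdist : (bps.all fun bp => !decide (bp.1 + 4 ≥ bp.2))
            = (bps.all fun bp => decide (bp.1 + 5 ≤ bp.2)) :=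
          List.all_congr rfl (fun bp => dist_eq bp.1 bp.2)
        have hokB : bps.all (okB seq (alt_ok_pairs w))
            = ((bps.all fun bp => decide (bp.1 + 5 ≤ bp.2))
               && (bps.all fun bp =>
                    PySem.Set.contains (alt_ok_pairs w) (lw seq bp.1, lw seq bp.2))) := by
          rw [← all_and]; rfl
        rw [hvp, hvh, hdtp]
        have hpos : decide (0 < 0 + bps.length) = true := by
          simpa using hlpos
        by_cases hlen : PySem.Str.len seq = PySem.Str.len ss
        · have hnlen : ¬ (PySem.Str.len seq ≠ PySem.Str.len ss) := by simpa using hlen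
          rw [if_neg hnlen]
          have hbeq : (PySem.Str.len seq == PySem.Str.len ss) = true := by rw [hlen]; simp
          simp only [hbeq, Bool.and_true, List.isEmpty_nil, Bool.true_and, hpos]
          rw [hokB, ← hdist]
          by_cases hall : (bps.all fun bp => !decide (bp.1 + 4 ≥ bp.2)) = true
          · rw [hall]
            simp only [Bool.not_true, Bool.true_and]
            rw [if_neg (by simp)]
            simp only [Option.getD_some]
            rw [hperm.all_eq]
            exact List.all_congr rfl (fun bp => by rw [base_eq]; rfl)
          · have hallf : (bps.all fun bp => !decide (bp.1 + 4 ≥ bp.2)) = false := by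
              simpa using hall
            rw [hallf]
            simp
        · rw [if_pos (show PySem.Str.len seq ≠ PySem.Str.len ss from by simpa using hlen)]
          have hbeq0 : (PySem.Str.len seq == PySem.Str.len ss) = false := by
            simpa using hlen
          rw [hbeq0]
          simp

-- ===== VERDICT (by name: the statement is the Claim_ definition above) =====
theorem rna_ss_validator_spec : Claim_equal_rna_ss_validator := by
  intro seq ss w _
  unfold Spec_rna_ss_validator
  exact main_eq seq ss w
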